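-- pv_equiv track=rewrite | github.com/captainjack331089/captainjack33.LeetCode | LeetCode_Array/914_X_Of_A_Kind_in_A_Deck_Of_Cards.py | hasGroupSizeX
-- ===== SOURCE A (Python) =====
-- import collections
--
-- def hasGroupSizeX(deck):
--     lookup = collections.Counter(deck)
--     length = len(deck)
--     for i in range(2,length+1):
--         if length % i == 0:
--             if all(x % i == 0 for x in lookup.values()):
--                 return True
--     return False
-- ===== SOURCE B (Python) =====
-- import collections
--
-- def hasGroupSizeX(deck):
--     # gcd of all card counts; a valid group size X>=2 exists iff the gcd is >= 2
--     g = 0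
--     for v in collections.Counter(deck).values():
--         while v:
--             g, v = v, g % v
--     return g >= 2
-- ===== Notes on version B (the rewrite author's own statement) =====
-- stated objective: alternative
-- what changed: Replaces the trial loop over every candidate divisor i in 2..len(deck) (each checked against all counts) by a single Euclidean-gcd fold over the counts, returning gcd >= 2; worst-case asymptotics improve but random inputs time the same.
import Mathlib
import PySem

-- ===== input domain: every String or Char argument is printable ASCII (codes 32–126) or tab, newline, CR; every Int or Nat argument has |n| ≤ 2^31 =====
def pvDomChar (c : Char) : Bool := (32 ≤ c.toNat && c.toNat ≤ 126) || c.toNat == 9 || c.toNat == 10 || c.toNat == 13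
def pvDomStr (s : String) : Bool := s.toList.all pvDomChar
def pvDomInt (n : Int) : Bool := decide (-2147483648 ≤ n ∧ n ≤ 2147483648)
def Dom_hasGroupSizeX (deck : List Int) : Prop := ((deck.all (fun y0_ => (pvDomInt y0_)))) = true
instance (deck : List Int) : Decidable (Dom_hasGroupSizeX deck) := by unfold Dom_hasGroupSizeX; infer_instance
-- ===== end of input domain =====

-- B replaces A's trial loop over every candidate group size i in 2..len(deck) by a single
-- Euclidean-gcd fold over the card counts (gcd >= 2); equivalence of the return values is proved below.

-- ===== PORT A =====
-- the 'for i in range(2, length+1)' loop with its early 'return True'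
def hasGroupSizeX_go (lookup : PySem.Dict Int Int) (length : Int) : List Int → Bool
  | [] => false
  | i :: rest =>
      if PySem.Int.mod length i == 0 && (lookup.values.all (fun x => PySem.Int.mod x i == 0))
      then true
      else hasGroupSizeX_go lookup length rest

def hasGroupSizeX (deck : List Int) : Bool :=
  let lookup : PySem.Dict Int Int := PySem.Dict.counter deck
  let length : Int := deck.length
  hasGroupSizeX_go lookup length (PySem.List.pyRange 2 (length + 1) 1)

-- ===== PORT B =====
-- termination measure for the inner Euclidean 'while v: g, v = v, g % v' loop
theorem pymod_natAbs_lt (g v : Int) (h : v ≠ 0) :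
    (PySem.Int.mod g v).natAbs < v.natAbs := by
  rcases lt_or_gt_of_ne h with hv | hv
  · have := PySem.Int.mod_neg_bounds g hv
    omega
  · have h1 := PySem.Int.mod_nonneg g hv
    have h2 := PySem.Int.mod_lt g hv
    omega

-- 'while v: g, v = v, g % v' from Source B
def gcdStep (g v : Int) : Int :=
  if h : v = 0 then g else gcdStep v (PySem.Int.mod g v)
termination_by v.natAbs
decreasing_by exact pymod_natAbs_lt g v h

def hasGroupSizeX_alt (deck : List Int) : Bool :=
  let g : Int := (PySem.Dict.counter deck).values.foldl (fun g v => gcdStep g v) 0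
  decide (2 ≤ g)

-- ===== PRECONDITION & SPEC =====
def Spec_hasGroupSizeX (deck : List Int) (out : Bool) : Prop := out = hasGroupSizeX_alt deck
instance (deck : List Int) (out : Bool) : Decidable (Spec_hasGroupSizeX deck out) := by unfold Spec_hasGroupSizeX; infer_instance

-- ===== CLAIM (what is proved, stated in full; the proofs are below) =====
def Claim_equal_hasGroupSizeX : Prop := ∀ (deck : List Int), Dom_hasGroupSizeX deck → Spec_hasGroupSizeX deck (hasGroupSizeX deck)

-- ===== LEMMAS AND PROOFS =====

-- gcdStep computes a greatest common divisor (stated as the universal property it has on any inputs)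
theorem gcdStep_charac (g v : Int) :
    gcdStep g v ∣ g ∧ gcdStep g v ∣ v ∧ ∀ d : Int, d ∣ g → d ∣ v → d ∣ gcdStep g v := by
  by_cases hv : v = 0
  · subst hv
    rw [gcdStep]
    simp
  · rw [gcdStep]
    simp only [hv, dif_neg, not_false_iff]
    obtain ⟨h1, h2, h3⟩ := gcdStep_charac v (PySem.Int.mod g v)
    have hsplit := PySem.Int.floordiv_mul_add_mod g v
    refine ⟨?_, h1, ?_⟩
    · have h4 : gcdStep v (PySem.Int.mod g v) ∣
          PySem.Int.floordiv g v * v + PySem.Int.mod g v :=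
        dvd_add (h1.mul_left _) h2
      rwa [hsplit] at h4
    · intro d hdg hdv
      apply h3 _ hdv
      have h5 : d ∣ PySem.Int.floordiv g v * v + PySem.Int.mod g v := by rw [hsplit]; exact hdg
      have h6 : d ∣ (PySem.Int.floordiv g v * v + PySem.Int.mod g v) - PySem.Int.floordiv g v * v :=
        dvd_sub h5 (hdv.mul_left _)
      simpa using h6
termination_by v.natAbs
decreasing_by exact pymod_natAbs_lt g v hv

theorem gcdStep_nonneg (g v : Int) (hg : 0 ≤ g) (hv0 : 0 ≤ v) : 0 ≤ gcdStep g v := by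
  by_cases hv : v = 0
  · subst hv; rw [gcdStep]; simpa
  · rw [gcdStep]
    simp only [hv, dif_neg, not_false_iff]
    have hpos : 0 < v := lt_of_le_of_ne hv0 (Ne.symm hv)
    exact gcdStep_nonneg v (PySem.Int.mod g v) hv0 (PySem.Int.mod_nonneg g hpos)
termination_by v.natAbs
decreasing_by exact pymod_natAbs_lt g v hv

-- the fold of gcdStep over a list: its universal gcd property
theorem foldl_gcdStep_charac (vals : List Int) (a : Int) :
    (vals.foldl (fun g v => gcdStep g v) a ∣ a) ∧
    (∀ v ∈ vals, vals.foldl (fun g v => gcdStep g v) a ∣ v) ∧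
    (∀ d : Int, d ∣ a → (∀ v ∈ vals, d ∣ v) → d ∣ vals.foldl (fun g v => gcdStep g v) a) := by
  induction vals generalizing a with
  | nil => simp
  | cons x t ih =>
    obtain ⟨hga, hgv, hgr⟩ := ih (gcdStep a x)
    obtain ⟨hda, hdx, hdu⟩ := gcdStep_charac a x
    refine ⟨?_, ?_, ?_⟩
    · simpa using hga.trans hda
    · intro v hv
      rcases List.mem_cons.mp hv with rfl | hv
      · simpa using hga.trans hdx
      · simpa using hgv v hv
    · intro d hda' hdv
      simp only [List.foldl_cons]
      exact hgr d (hdu d hda' (hdv x (List.mem_cons_self))) (fun v hv => hdv v (List.mem_cons_of_mem x hv))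

theorem foldl_gcdStep_nonneg (vals : List Int) (a : Int) (ha : 0 ≤ a)
    (hvals : ∀ v ∈ vals, 0 ≤ v) :
    0 ≤ vals.foldl (fun g v => gcdStep g v) a := by
  induction vals generalizing a with
  | nil => simpa
  | cons x t ih =>
    exact ih (gcdStep a x) (gcdStep_nonneg a x ha (hvals x List.mem_cons_self))
      (fun v hv => hvals v (List.mem_cons_of_mem x hv))

-- A's loop returns true iff some candidate passes the test
theorem hasGroupSizeX_go_eq_any (lookup : PySem.Dict Int Int) (n : Int) (cands : List Int) :
    hasGroupSizeX_go lookup n cands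
      = cands.any (fun i => PySem.Int.mod n i == 0 && (lookup.values.all (fun x => PySem.Int.mod x i == 0))) := by
  induction cands with
  | nil => rfl
  | cons i rest ih =>
    rw [hasGroupSizeX_go, List.any_cons]
    split_ifs with h
    · simp [h]
    · simp only [ih]
      rw [Bool.eq_false_iff.mpr h]
      simp

-- the counter's values: each is the count of a distinct element of deck
theorem values_counter_eq (deck : List Int) :
    (PySem.Dict.counter deck).values = (PySem.Set.ofList deck).map (fun k => (deck.count k : Int)) := by
  have h := PySem.Dict.items_counter (xs := deck)
  have : (PySem.Dict.counter deck).values = (PySem.Dict.counter deck).items.map Prod.snd := by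
    simp [PySem.Dict.values]
  rw [this, h, List.map_map]
  rfl

theorem values_counter_pos (deck : List Int) (v : Int)
    (hv : v ∈ (PySem.Dict.counter deck).values) : 1 ≤ v := by
  rw [values_counter_eq] at hv
  obtain ⟨k, hk, rfl⟩ := List.mem_map.mp hv
  have : k ∈ deck := (PySem.Set.mem_ofList deck k).mp hk
  have : 1 ≤ deck.count k := List.count_pos_iff.mpr this
  exact_mod_cast this

theorem values_counter_sum (deck : List Int) :
    (PySem.Dict.counter deck).values.sum = (deck.length : Int) := by
  rw [values_counter_eq]
  have hperm : (PySem.Set.ofList deck).Perm deck.dedup := by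
    rw [List.perm_ext_iff_of_nodup (PySem.Set.nodup_ofList deck) deck.nodup_dedup]
    intro a
    rw [PySem.Set.mem_ofList, List.mem_dedup]
  have := (hperm.map (fun k => (deck.count k : Int))).sum_eq
  rw [this]
  have hnat : (deck.dedup.map fun x => deck.count x).sum = deck.length :=
    List.sum_map_count_dedup_eq_length deck
  have : (deck.dedup.map fun k => (deck.count k : Int)).sum
      = ((deck.dedup.map fun x => deck.count x).sum : Int) := by
    induction deck.dedup with
    | nil => simp
    | cons x t ih => simp [ih]
  rw [this, hnat]

theorem values_counter_nonempty (deck : List Int) (h : deck ≠ []) :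
    (PySem.Dict.counter deck).values ≠ [] := by
  rw [values_counter_eq]
  simp only [ne_eq, List.map_eq_nil_iff]
  intro hnil
  obtain ⟨x, hx⟩ := List.exists_mem_of_ne_nil deck h
  have := (PySem.Set.mem_ofList deck x).mpr hx
  rw [hnil] at this
  exact absurd this (List.not_mem_nil)

-- ===== VERDICT (by name: the statement is the Claim_ definition above) =====
theorem hasGroupSizeX_spec : Claim_equal_hasGroupSizeX := by
  intro deck _
  unfold Spec_hasGroupSizeX hasGroupSizeX hasGroupSizeX_alt
  simp only []
  set vals := (PySem.Dict.counter deck).values with hvals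
  set G := vals.foldl (fun g v => gcdStep g v) 0 with hG
  set n : Int := (deck.length : Int) with hn
  obtain ⟨-, hGv, hGu⟩ := foldl_gcdStep_charac vals 0
  have hGnn : 0 ≤ G := foldl_gcdStep_nonneg vals 0 le_rfl (fun v hv => le_trans zero_le_one (values_counter_pos deck v hv))
  rw [hasGroupSizeX_go_eq_any, Bool.eq_iff_iff, List.any_eq_true, decide_eq_true_iff]
  constructor
  · rintro ⟨i, hi, htest⟩
    rw [Bool.and_eq_true, beq_iff_eq, List.all_eq_true] at htest
    obtain ⟨hmodn, hall⟩ := htest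
    have hrange := (PySem.List.mem_pyRange_one (a := 2) (b := n + 1) (x := i)).mp hi
    have hi2 : 2 ≤ i := hrange.1
    -- i divides G
    have hiG : i ∣ G := hGu i ⟨0, by ring⟩ (fun v hv => by
      have := hall v hv
      rw [beq_iff_eq] at this
      exact (PySem.Int.mod_eq_zero_iff_dvd v i).mp this)
    -- deck is nonempty (i ≤ n forces n ≥ 2), so some value is ≥ 1, hence G ≠ 0
    have hdeck : deck ≠ [] := by
      intro hnil
      have : n = 0 := by simp [hn, hnil]
      omega
    obtain ⟨v, hv⟩ := List.exists_mem_of_ne_nil vals (values_counter_nonempty deck hdeck)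
    have hv1 : 1 ≤ v := values_counter_pos deck v hv
    have hGne : G ≠ 0 := by
      intro h0
      have hdv := hGv v hv
      rw [← hG, h0] at hdv
      have : v = 0 := zero_dvd_iff.mp hdv
      omega
    have : i ≤ G := Int.le_of_dvd (lt_of_le_of_ne hGnn (Ne.symm hGne)) hiG
    omega
  · intro hG2
    refine ⟨G, ?_, ?_⟩
    · rw [PySem.List.mem_pyRange_one]
      -- G divides n = sum of vals, and n > 0, so 2 ≤ G ≤ n
      have hGn : G ∣ n := by
        rw [hn, ← values_counter_sum deck]
        exact List.dvd_sum (fun v hv => hGv v hv)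
      have hdeck : deck ≠ [] := by
        intro hnil
        have hve : vals = [] := by rw [hvals, hnil]; decide
        rw [hve] at hG
        simp at hG
        omega
      have hnpos : 0 < n := by
        rw [hn]
        have := List.length_pos_of_ne_nil hdeck
        exact_mod_cast this
      have : G ≤ n := Int.le_of_dvd hnpos hGn
      omega
    · rw [Bool.and_eq_true, beq_iff_eq, List.all_eq_true]
      constructor
      · rw [PySem.Int.mod_eq_zero_iff_dvd]
        rw [hn, ← values_counter_sum deck]
        exact List.dvd_sum (fun v hv => hGv v hv)
      · intro v hv
        rw [beq_iff_eq, PySem.Int.mod_eq_zero_iff_dvd]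
        exact hGv v hv
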